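-- pv_equiv track=rewrite | github.com/geoff-oco/Agent-in-the-Loop-Repository | agent/screen_reading/parsers/save_state_parser.py | _group_by_phase
-- ===== SOURCE A (Python) =====
-- from typing import Dict, List
--
-- def _group_by_phase(allocations: List[Dict]) -> Dict[int, List[Dict]]:
--     # Group transformed allocations by phase number, returns {1: [...], 2: [...], 3: [...]}
--     grouped = {}
--
--     for allocation in allocations:
--         phase = allocation["phase"]
--
--         # Remove phase field from allocation (not needed in final output)
--         allocation_clean = {k: v for k, v in allocation.items() if k != "phase"}
--
--         if phase not in grouped:
--             grouped[phase] = []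
--
--         grouped[phase].append(allocation_clean)
--
--     # Ensure all phases 1-3 exist (even if empty)
--     for phase_num in [1, 2, 3]:
--         if phase_num not in grouped:
--             grouped[phase_num] = []
--
--     return grouped
-- ===== SOURCE B (Python) =====
-- from typing import Dict, List
--
-- def _group_by_phase(allocations: List[Dict]) -> Dict[int, List[Dict]]:
--     # Distinct phases in first-occurrence order, then any of 1-3 still missing.
--     phases = list(dict.fromkeys(a["phase"] for a in allocations))
--     phases += [p for p in (1, 2, 3) if p not in phases]
--     # One filtered pass per phase, stripping the phase key.
--     return {p: [{k: v for k, v in a.items() if k != "phase"}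
--                 for a in allocations if a["phase"] == p]
--             for p in phases}
-- ===== Notes on version B (the rewrite author's own statement) =====
-- stated objective: alternative
-- what changed: A builds the result incrementally in one pass, mutating a dict with membership tests and appends; B first computes the ordered list of distinct phases (dict.fromkeys, plus missing phases 1-3) and then builds each group by an independent filtered comprehension over the allocations, one pass per phase.
import Mathlib
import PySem

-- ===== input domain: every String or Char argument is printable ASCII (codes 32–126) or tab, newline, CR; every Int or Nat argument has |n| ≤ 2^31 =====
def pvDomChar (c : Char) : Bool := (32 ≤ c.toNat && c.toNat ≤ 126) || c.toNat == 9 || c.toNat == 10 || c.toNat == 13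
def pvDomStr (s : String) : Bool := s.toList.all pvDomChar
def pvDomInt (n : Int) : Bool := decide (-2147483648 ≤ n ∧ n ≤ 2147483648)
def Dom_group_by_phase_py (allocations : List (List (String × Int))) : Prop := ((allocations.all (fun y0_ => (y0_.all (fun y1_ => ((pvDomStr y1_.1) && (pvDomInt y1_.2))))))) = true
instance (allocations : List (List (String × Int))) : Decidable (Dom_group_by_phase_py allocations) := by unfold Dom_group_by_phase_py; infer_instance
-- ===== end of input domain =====

-- B groups by an ordered distinct-phase pass plus one filtered comprehension per phase
-- instead of A's single mutating-dict accumulation pass (objective: alternative decomposition).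

-- ===== PORT A =====
-- allocation["phase"]: Pre_ guarantees the key is present (a missing key is Python's
-- KeyError, excluded by Pre_), so the default 0 below is never reached on admitted inputs.
def pvPhase (a : List (String × Int)) : Int := (PySem.Dict.mk a).getD "phase" 0

-- {k: v for k, v in allocation.items() if k != "phase"}: exact as a filter since
-- Pre_ guarantees the allocation's keys are distinct.
def pvClean (a : List (String × Int)) : List (String × Int) :=
  a.filter (fun kv => kv.1 ≠ "phase")

def group_by_phase_py (allocations : List (List (String × Int))) : List (Int × List (List (String × Int))) :=
  let grouped : PySem.Dict Int (List (List (String × Int))) := allocations.foldl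
    (fun g allocation =>
      let phase := pvPhase allocation
      let clean := pvClean allocation
      let g := if g.contains phase then g else g.insert phase []
      g.modify phase [] (fun l => l ++ [clean]))
    PySem.Dict.empty
  let grouped := [(1 : Int), 2, 3].foldl
    (fun g p => if g.contains p then g else g.insert p []) grouped
  grouped.items

-- ===== PORT B =====
def group_by_phase_py_alt (allocations : List (List (String × Int))) : List (Int × List (List (String × Int))) :=
  let phases := PySem.List.dedup (allocations.map pvPhase)
  let phases := phases ++ ([(1 : Int), 2, 3].filter (fun p => !phases.contains p))
  phases.map (fun p =>
    (p, (allocations.filter (fun a => pvPhase a == p)).map pvClean))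

-- ===== PRECONDITION & SPEC =====
-- Pre_ excludes allocations missing the key "phase" (A raises KeyError there) and
-- association lists with duplicate keys, which a Python dict cannot represent.
def Pre_group_by_phase_py (allocations : List (List (String × Int))) : Prop :=
  ∀ a ∈ allocations, (a.map Prod.fst).Nodup ∧ "phase" ∈ a.map Prod.fst
instance (allocations : List (List (String × Int))) : Decidable (Pre_group_by_phase_py allocations) := by unfold Pre_group_by_phase_py; infer_instance

def pvWitness_group_by_phase_py : (List (List (String × Int))) :=
  [[("phase", 2), ("x", 5)], [("phase", 2), ("y", -1)], [("phase", 1)]]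

def Spec_group_by_phase_py (allocations : List (List (String × Int))) (out : List (Int × List (List (String × Int)))) : Prop := out = group_by_phase_py_alt allocations
instance (allocations : List (List (String × Int))) (out : List (Int × List (List (String × Int)))) : Decidable (Spec_group_by_phase_py allocations out) := by unfold Spec_group_by_phase_py; infer_instance

-- ===== CLAIM (what is proved, stated in full; the proofs are below) =====
def Claim_equal_group_by_phase_py : Prop := ∀ (allocations : List (List (String × Int))), Dom_group_by_phase_py allocations → Pre_group_by_phase_py allocations → Spec_group_by_phase_py allocations (group_by_phase_py allocations)

-- ===== LEMMAS AND PROOFS =====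

-- A's "ensure key then append" step is one modify with default [].
theorem pv_step_eq {V : Type} (g : PySem.Dict Int V) (k : Int) (d0 : V) (f : V → V) :
    ((g.setdefault k d0).modify k d0 f) = g.modify k d0 f := by
  by_cases h : g.contains k = true
  · simp [PySem.Dict.setdefault, h]
  · have hf : g.contains k = false := by simpa using h
    have hg : g.getD k d0 = d0 := PySem.Dict.getD_of_not_contains g d0 hf
    have h1 : (g.insert k d0).getD k d0 = d0 := by
      rw [PySem.Dict.getD_eq_get?_getD, PySem.Dict.get?_insert_self]; rfl
    have hins : g.insert k d0 = ⟨g.items ++ [(k, d0)]⟩ := by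
      simp [PySem.Dict.insert, hf]
    simp only [PySem.Dict.setdefault, hf, Bool.false_eq_true, if_false, PySem.Dict.modify,
      ← hins, h1, hg, PySem.Dict.insert_insert_self]

-- A's "if phase_num not in grouped: grouped[phase_num] = []" is setdefault.
theorem pv_sd_eq {V : Type} (g : PySem.Dict Int V) (p : Int) (v : V) :
    (if g.contains p then g else g.insert p v) = g.setdefault p v := by
  simp only [PySem.Dict.setdefault]
  split_ifs with h
  · rfl
  · simp [PySem.Dict.insert, h]

theorem pv_getD_sd (g : PySem.Dict Int (List (List (String × Int)))) (k q : Int) :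
    ((g.setdefault k []).getD q []) = g.getD q [] := by
  by_cases h : q = k
  · subst h; rw [PySem.Dict.getD_setdefault_self]
  · rw [PySem.Dict.getD_eq_get?_getD, PySem.Dict.get?_setdefault_of_ne _ _ h,
      ← PySem.Dict.getD_eq_get?_getD]

theorem pv_keys_sd {V : Type} (g : PySem.Dict Int V) (k : Int) (v : V) :
    (g.setdefault k v).keys = PySem.Set.add g.keys k := by
  rw [PySem.Dict.keys_setdefault, PySem.Set.add_eq_ite,
    PySem.Dict.contains_eq_decide_mem_keys]
  split_ifs with h1 h2 h2 <;> simp_all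

-- ===== VERDICT (by name: the statement is the Claim_ definition above) =====
theorem group_by_phase_py_spec : Claim_equal_group_by_phase_py := by
  intro allocations _ _
  show group_by_phase_py allocations = group_by_phase_py_alt allocations
  unfold group_by_phase_py group_by_phase_py_alt
  simp only [pv_sd_eq, pv_step_eq, List.foldl_cons, List.foldl_nil]
  set G : PySem.Dict Int (List (List (String × Int))) :=
    allocations.foldl (fun g a => g.modify (pvPhase a) [] (fun l => l ++ [pvClean a]))
      PySem.Dict.empty with hG
  have hGkeys : G.keys = PySem.Set.ofList (allocations.map pvPhase) := by
    have h := PySem.Dict.keys_foldl_modify_key allocations pvPhase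
      ([] : List (List (String × Int))) (fun _ a l => l ++ [pvClean a]) PySem.Dict.empty
    simpa [hG] using h
  have hGnodup : G.keys.Nodup := by
    rw [hGkeys]; exact PySem.Set.nodup_ofList _
  have hGgetD : ∀ p : Int, G.getD p [] =
      (allocations.filter (fun a => pvPhase a == p)).map pvClean := by
    intro p
    have h := PySem.Dict.getD_foldl_modify_append
      (l := allocations.map (fun a => (pvPhase a, pvClean a)))
      (d := (PySem.Dict.empty : PySem.Dict Int (List (List (String × Int))))) (c := p)
    rw [List.foldl_map] at h
    simpa [hG, List.filter_map, List.map_map, Function.comp] using h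
  have hFgetD : ∀ q : Int,
      ((((G.setdefault 1 []).setdefault 2 []).setdefault 3 []).getD q []) = G.getD q [] := by
    intro q; rw [pv_getD_sd, pv_getD_sd, pv_getD_sd]
  have hFkeys : ((((G.setdefault 1 []).setdefault 2 []).setdefault 3 []).keys)
      = PySem.Set.update G.keys [1, 2, 3] := by
    rw [pv_keys_sd, pv_keys_sd, pv_keys_sd]
    simp [PySem.Set.update]
  have hFnodup : ((((G.setdefault 1 []).setdefault 2 []).setdefault 3 []).keys).Nodup := by
    rw [hFkeys]; exact PySem.Set.nodup_update _ _ hGnodup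
  rw [PySem.Dict.items_eq_map_keys _ hFnodup []]
  have hfun : (fun k => (k, (((G.setdefault 1 []).setdefault 2 []).setdefault 3 []).getD k []))
      = (fun p => (p, (allocations.filter (fun a => pvPhase a == p)).map pvClean)) := by
    funext p; rw [hFgetD, hGgetD]
  rw [hfun, hFkeys, hGkeys, PySem.Set.update_eq_append_filter]
  simp only [PySem.List.dedup_eq_ofList]
  have h123 : PySem.Set.ofList ([1, 2, 3] : List Int) = [1, 2, 3] := by decide
  rw [h123]
  simp
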